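-- pv_equiv track=rewrite | github.com/jjweidon/exct | programmers/택배_배달과_수거하기.py | solution
-- ===== SOURCE A (Python) =====
-- import math
--
-- def solution(cap, n, deliveries, pickups):
--     def deliver(arr):
--         distance = 0
--         boxes = 0
--         for i in range(n-1, 0, -1):
--             distance += (i+1) * math.ceil(arr[i] / cap)
--             if arr[i] % cap:
--                 arr[i-1] -= cap - (arr[i] % cap)
--             arr[i] = 0
--         distance += math.ceil(arr[0] / cap)
--
--         return distance * 2
--
--     return max(deliver(deliveries), deliver(pickups))
-- ===== SOURCE B (Python) =====
-- def solution(cap, n, deliveries, pickups):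
--     # Non-mutating backward pass: keep a running suffix load and count
--     # ceil(load / cap) trips at each house (exact integer ceiling).
--     def trips(arr):
--         total = 0
--         load = 0
--         for i in range(n - 1, 0, -1):
--             load += arr[i]
--             total += -(-load // cap)
--         load += arr[0]
--         total += -(-load // cap)
--         return total * 2
--     return max(trips(deliveries), trips(pickups))
-- ===== Notes on version B (the rewrite author's own statement) =====
-- stated objective: simpler
-- what changed: Replaces the in-place carry-back greedy (which mutates the array, propagating slack carries and weighting each house's per-house ceil by its distance) with a non-mutating backward pass that keeps one running suffix load and sums exact integer ceilings ceil(load/cap) of the cumulative load; same x2 factor and outer max.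
import Mathlib
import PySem

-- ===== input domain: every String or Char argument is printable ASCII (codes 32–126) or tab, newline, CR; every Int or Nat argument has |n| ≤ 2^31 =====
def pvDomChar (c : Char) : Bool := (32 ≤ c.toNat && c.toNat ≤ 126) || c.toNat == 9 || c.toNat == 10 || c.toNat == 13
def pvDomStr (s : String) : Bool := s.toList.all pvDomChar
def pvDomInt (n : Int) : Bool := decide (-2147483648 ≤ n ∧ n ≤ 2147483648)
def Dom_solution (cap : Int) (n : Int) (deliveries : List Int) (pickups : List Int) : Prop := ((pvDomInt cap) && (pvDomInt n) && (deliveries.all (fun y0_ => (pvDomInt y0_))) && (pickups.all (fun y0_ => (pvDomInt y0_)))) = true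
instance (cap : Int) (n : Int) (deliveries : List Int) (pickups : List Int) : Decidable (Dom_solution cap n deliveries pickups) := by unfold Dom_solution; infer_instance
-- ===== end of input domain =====

-- B is a simpler, non-mutating backward suffix-load pass; equivalence is about the RETURN
-- value only (Python A zeroes/decrements its list arguments in place, B does not).

-- ===== PORT A =====
-- math.ceil(x / cap) on Python floats is exact ceiling division for the magnitudes Dom admits
-- (|numerator| < 2^32, checked against CPython by the differential tester); ported as -((-a) // b).
def pvCeilDiv (a b : Int) : Int := -(PySem.Int.floordiv (-a) b)

-- the 'for i in range(n-1, 0, -1)' loop of A's inner 'deliver', state = (arr, distance);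
-- indexing is in range under Pre_ (Python raises IndexError outside, excluded there).
def deliverGoA (cap : Int) : Nat → List Int → Int → List Int × Int
  | 0, a, d => (a, d)
  | i+1, a, d =>
    let v := a.getD (i+1) 0
    let d' := d + ((i : Int) + 2) * pvCeilDiv v cap
    let a' := if PySem.Int.mod v cap ≠ 0
              then a.set i (a.getD i 0 - (cap - PySem.Int.mod v cap)) else a
    deliverGoA cap i (a'.set (i+1) 0) d'

def deliverA (cap n : Int) (arr : List Int) : Int :=
  let r := deliverGoA cap (n-1).toNat arr 0
  (r.2 + pvCeilDiv (r.1.getD 0 0) cap) * 2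

def solution (cap : Int) (n : Int) (deliveries : List Int) (pickups : List Int) : Int :=
  max (deliverA cap n deliveries) (deliverA cap n pickups)

-- ===== PORT B =====
-- the 'for i in range(n-1, 0, -1)' loop of B's 'trips', state = (load, total)
def tripsGoB (cap : Int) (arr : List Int) : Nat → Int → Int → Int × Int
  | 0, load, total => (load, total)
  | i+1, load, total =>
    let load' := load + arr.getD (i+1) 0
    tripsGoB cap arr i load' (total + pvCeilDiv load' cap)

def tripsB (cap n : Int) (arr : List Int) : Int :=
  let r := tripsGoB cap arr (n-1).toNat 0 0
  let load := r.1 + arr.getD 0 0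
  (r.2 + pvCeilDiv load cap) * 2

def solution_alt (cap : Int) (n : Int) (deliveries : List Int) (pickups : List Int) : Int :=
  max (tripsB cap n deliveries) (tripsB cap n pickups)

-- ===== PRECONDITION & SPEC =====
-- exactly where Python A returns: cap ≠ 0 (else ZeroDivisionError) and both lists nonempty
-- with n ≤ their lengths (else IndexError on arr[i] / arr[0])
def Pre_solution (cap : Int) (n : Int) (deliveries : List Int) (pickups : List Int) : Prop :=
  cap ≠ 0 ∧ deliveries ≠ [] ∧ pickups ≠ [] ∧
  n ≤ (deliveries.length : Int) ∧ n ≤ (pickups.length : Int)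
instance (cap : Int) (n : Int) (deliveries : List Int) (pickups : List Int) : Decidable (Pre_solution cap n deliveries pickups) := by unfold Pre_solution; infer_instance

def pvWitness_solution : Int × Int × List Int × List Int := (4, 3, [2, 5, 1], [1, 0, 2])

def Spec_solution (cap : Int) (n : Int) (deliveries : List Int) (pickups : List Int) (out : Int) : Prop := out = solution_alt cap n deliveries pickups
instance (cap : Int) (n : Int) (deliveries : List Int) (pickups : List Int) (out : Int) : Decidable (Spec_solution cap n deliveries pickups out) := by unfold Spec_solution; infer_instance

-- ===== CLAIM (what is proved, stated in full; the proofs are below) =====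
def Claim_equal_solution : Prop := ∀ (cap : Int) (n : Int) (deliveries : List Int) (pickups : List Int), Dom_solution cap n deliveries pickups → Pre_solution cap n deliveries pickups → Spec_solution cap n deliveries pickups (solution cap n deliveries pickups)

-- ===== LEMMAS AND PROOFS =====

-- ceiling division shifts by whole multiples of the divisor
theorem pvCeilDiv_sub_mul (b x T : Int) (hb : b ≠ 0) :
    pvCeilDiv (x - b * T) b = pvCeilDiv x b - T := by
  show -(Int.fdiv (-(x - b * T)) b) = -(Int.fdiv (-x) b) - T
  have h1 : -(x - b * T) = -x + T * b := by ring
  rw [h1, Int.add_mul_fdiv_right _ _ hb]; ring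

-- A's carry (cap - v % cap if v % cap != 0, else 0) equals cap * ceil(v/cap) - v
theorem pvCarry_eq (b v : Int) (hb : b ≠ 0) :
    (if PySem.Int.mod v b ≠ 0 then b - PySem.Int.mod v b else 0)
      = b * pvCeilDiv v b - v := by
  have key : b * pvCeilDiv v b - v = PySem.Int.mod (-v) b := by
    have h := PySem.Int.floordiv_mul_add_mod (-v) b
    show b * (-(PySem.Int.floordiv (-v) b)) - v = _
    linarith
  rw [key]
  by_cases hdvd : b ∣ v
  · have h1 : PySem.Int.mod v b = 0 := (PySem.Int.mod_eq_zero_iff_dvd v b).mpr hdvd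
    have h2 : PySem.Int.mod (-v) b = 0 := (PySem.Int.mod_eq_zero_iff_dvd (-v) b).mpr (Dvd.dvd.neg_right hdvd)
    simp [h1, h2]
  · have h1 : PySem.Int.mod v b ≠ 0 := fun h => hdvd ((PySem.Int.mod_eq_zero_iff_dvd v b).mp h)
    have h2 : PySem.Int.mod (-v) b ≠ 0 := fun h => hdvd (by
      have := (PySem.Int.mod_eq_zero_iff_dvd (-v) b).mp h
      exact (dvd_neg.mp this))
    rw [if_pos h1]
    -- show mod(-v,b) = b - mod(v,b)
    have e1 := PySem.Int.floordiv_mul_add_mod v b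
    have e2 := PySem.Int.floordiv_mul_add_mod (-v) b
    have hdv : b ∣ (PySem.Int.mod v b + PySem.Int.mod (-v) b) := by
      refine ⟨-(PySem.Int.floordiv v b + PySem.Int.floordiv (-v) b), ?_⟩
      nlinarith [e1, e2]
    obtain ⟨k, hk⟩ := hdv
    rcases lt_or_gt_of_ne hb with hneg | hpos
    · have b1 := PySem.Int.mod_neg_bounds v hneg
      have b2 := PySem.Int.mod_neg_bounds (-v) hneg
      have hr1 : PySem.Int.mod v b < 0 := lt_of_le_of_ne b1.2 h1
      have hr2 : PySem.Int.mod (-v) b < 0 := lt_of_le_of_ne b2.2 h2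
      have hsum_neg : b * k < 0 := by rw [← hk]; linarith
      have hsum_gt : 2 * b < b * k := by rw [← hk]; linarith [b1.1, b2.1]
      have hkpos : 0 < k := by
        by_contra h
        have h' : k ≤ 0 := by omega
        nlinarith
      have hklt : k < 2 := by
        by_contra h
        have h' : 2 ≤ k := by omega
        have : b * k ≤ b * 2 := mul_le_mul_of_nonpos_left h' (le_of_lt hneg)
        linarith
      have hk1 : k = 1 := by omega
      rw [hk1] at hk; linarith
    · have hr1 : 0 < PySem.Int.mod v b := lt_of_le_of_ne (PySem.Int.mod_nonneg v hpos) (Ne.symm h1)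
      have hr2 : 0 < PySem.Int.mod (-v) b := lt_of_le_of_ne (PySem.Int.mod_nonneg (-v) hpos) (Ne.symm h2)
      have hsum_pos : 0 < b * k := by rw [← hk]; linarith
      have hsum_lt : b * k < 2 * b := by
        rw [← hk]; linarith [PySem.Int.mod_lt v hpos, PySem.Int.mod_lt (-v) hpos]
      have hkpos : 0 < k := by
        by_contra h
        have h' : k ≤ 0 := by omega
        nlinarith
      have hklt : k < 2 := by
        by_contra h
        have h' : 2 ≤ k := by omega
        have : b * 2 ≤ b * k := mul_le_mul_of_nonneg_left h' (le_of_lt hpos)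
        linarith
      have hk1 : k = 1 := by omega
      rw [hk1] at hk; linarith

-- the main bridge between A's mutating loop and B's suffix-load loop
theorem pvBridge (cap : Int) (hb : cap ≠ 0) (arr : List Int) :
    ∀ (i : Nat) (b : List Int) (s T dB : Int),
      b.length = arr.length → i < arr.length →
      (∀ j : Nat, j ≤ i → b.getD j 0 = arr.getD j 0 - (if j = i then cap * T - s else 0)) →
      (deliverGoA cap i b (dB + ((i : Int) + 1) * T)).2
          + pvCeilDiv ((deliverGoA cap i b (dB + ((i : Int) + 1) * T)).1.getD 0 0) cap
        = (tripsGoB cap arr i s dB).2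
          + pvCeilDiv ((tripsGoB cap arr i s dB).1 + arr.getD 0 0) cap := by
  intro i
  induction i with
  | zero =>
    intro b s T dB hlen hi h
    have h0 : b.getD 0 0 = (s + arr.getD 0 0) - cap * T := by
      have := h 0 (le_refl 0)
      rw [if_pos (rfl : (0:Nat) = 0)] at this
      linarith
    simp only [deliverGoA, tripsGoB]
    rw [h0, pvCeilDiv_sub_mul _ _ _ hb]
    ring
  | succ i ih =>
    intro b s T dB hlen hi h
    have hv : b.getD (i+1) 0 = (s + arr.getD (i+1) 0) - cap * T := by
      have := h (i+1) (le_refl _)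
      rw [if_pos (rfl : i+1 = i+1)] at this
      linarith
    set s' := s + arr.getD (i+1) 0 with hs'
    set T' := pvCeilDiv s' cap with hT'
    have hceil : pvCeilDiv (b.getD (i+1) 0) cap = T' - T := by
      rw [hv, pvCeilDiv_sub_mul _ _ _ hb]
    simp only [deliverGoA, tripsGoB]
    rw [hceil]
    set b' := (if PySem.Int.mod (b.getD (i+1) 0) cap ≠ 0
              then b.set i (b.getD i 0 - (cap - PySem.Int.mod (b.getD (i+1) 0) cap)) else b) with hb'
    have harith : dB + (((i+1 : Nat) : Int) + 1) * T + ((i : Int) + 2) * (T' - T)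
        = (dB + T') + ((i : Int) + 1) * T' := by push_cast; ring
    rw [harith]
    apply ih (b'.set (i+1) 0) s' T' (dB + T')
    · rw [List.length_set, hb']
      split <;> simp [hlen]
    · omega
    · intro j hj
      have hne1 : ¬ (i+1 = j) := by omega
      have hgd : (b'.set (i+1) 0).getD j 0 = b'.getD j 0 := by
        simp [List.getD_eq_getElem?_getD, hne1]
      rcases Nat.lt_or_ge j i with hji | hji
      · have hunch : b'.getD j 0 = b.getD j 0 := by
          have hne2 : ¬ (i = j) := by omega
          rw [hb']; split
          · simp [List.getD_eq_getElem?_getD, hne2]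
          · rfl
        rw [hgd, hunch, h j (by omega), if_neg (by omega : ¬ j = i+1), if_neg (by omega : ¬ j = i)]
      · have hji' : j = i := by omega
        subst hji'
        have hjlen : j < b.length := by omega
        have hbj : b'.getD j 0 = b.getD j 0
            - (if PySem.Int.mod (b.getD (j+1) 0) cap ≠ 0
               then cap - PySem.Int.mod (b.getD (j+1) 0) cap else 0) := by
          rw [hb']; split
          · rename_i hc
            simp [List.getD_eq_getElem?_getD, hjlen]
          · rename_i hc
            simp
        have hb0 : b.getD j 0 = arr.getD j 0 := by
          have := h j (by omega)
          rw [if_neg (by omega : ¬ j = j+1)] at this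
          simpa using this
        rw [hgd, hbj, pvCarry_eq _ _ hb, hceil, hv, hb0, if_pos (rfl : j = j)]
        ring

theorem pvDeliver_eq (cap n : Int) (arr : List Int) (hb : cap ≠ 0) (hne : arr ≠ [])
    (hn : n ≤ (arr.length : Int)) : deliverA cap n arr = tripsB cap n arr := by
  have hlen : 0 < arr.length := List.length_pos_iff.mpr hne
  have hk : (n-1).toNat < arr.length := by omega
  have h := pvBridge cap hb arr (n-1).toNat arr 0 0 0 rfl hk (by intro j hj; simp)
  have e0 : (0 : Int) + ((((n-1).toNat : Nat) : Int) + 1) * 0 = 0 := by ring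
  rw [e0] at h
  simp only [deliverA, tripsB]
  rw [h]

-- ===== VERDICT (by name: the statement is the Claim_ definition above) =====
theorem solution_spec : Claim_equal_solution := by
  intro cap n deliveries pickups _hD hP
  obtain ⟨hb, hd, hp, hld, hlp⟩ := hP
  unfold Spec_solution solution solution_alt
  rw [pvDeliver_eq cap n deliveries hb hd hld, pvDeliver_eq cap n pickups hb hp hlp]
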